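-- pv_equiv track=rewrite | github.com/nlouie/Number-Partition-Heuristics | Karmarkar_Karp.py | karmarkar_karp
-- ===== SOURCE A (Python) =====
-- import heapq
--
-- def karmarkar_karp(l):
--     n = len(l)
--     K = sum(l)
--
--     # init heap, but since heappop only pops the min value, we will multiply each input value by -1
--     heap = []
--     for item in l:
--         heapq.heappush(heap, item * -1)
--     heapq.heapify(heap)
--
--     while len(heap) > 1:
--         i = heapq.heappop(heap)
--         j = heapq.heappop(heap)
--         heapq.heappush(heap, abs(i - j) * -1)
--
--     # the result should be the residue. Switch negative sign back.
--     r = heapq.heappop(heap) * -1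
--
--     return abs(r)
-- ===== SOURCE B (Python) =====
-- def karmarkar_karp(l):
--     u = sorted(l, reverse=True)
--     while len(u) > 1:
--         a, b, u = u[0], u[1], u[2:]
--         d = a - b
--         i = 0
--         while i < len(u) and u[i] >= d:
--             i += 1
--         u.insert(i, d)
--     return abs(u[0])
-- ===== Notes on version B (the rewrite author's own statement) =====
-- stated objective: simpler
-- what changed: Replaces the negated binary heap with a one-time descending sort followed by taking the first two elements and re-inserting their difference at its sorted position.
import Mathlib
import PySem

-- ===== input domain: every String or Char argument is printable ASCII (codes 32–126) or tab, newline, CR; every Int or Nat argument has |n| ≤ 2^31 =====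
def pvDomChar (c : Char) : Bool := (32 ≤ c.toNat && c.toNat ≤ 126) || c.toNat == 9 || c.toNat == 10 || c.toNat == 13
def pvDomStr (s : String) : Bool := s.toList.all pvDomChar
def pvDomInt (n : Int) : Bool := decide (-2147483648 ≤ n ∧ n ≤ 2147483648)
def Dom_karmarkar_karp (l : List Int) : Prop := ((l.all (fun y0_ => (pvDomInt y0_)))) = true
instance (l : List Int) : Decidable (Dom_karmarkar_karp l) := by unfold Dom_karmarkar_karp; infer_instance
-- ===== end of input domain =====

-- B replaces A's negated binary heap by a one-time descending sort plus ordered re-insertion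
-- of the difference of the two leading elements (objective: simpler).

-- ===== PORT A =====
-- heapq is modeled at the level of values, which is exact for Int elements: heappop returns
-- the minimum value of the heap's contents and removes one occurrence of it, heappush adds
-- its value, and heapify does not change the contents; the returned residue depends only on
-- the sequence of values popped and pushed.
def kkListMin : List Int → Int
  | [] => 0          -- unreachable: only applied to nonempty heaps
  | x :: xs => xs.foldl min x

def kkRemoveFirst : List Int → Int → List Int
  | [], _ => []
  | x :: xs, v => if x = v then xs else x :: kkRemoveFirst xs v

-- the two lemmas below are cited by kkLoopA's decreasing_by
theorem foldl_min_mem (xs : List Int) (a : Int) : xs.foldl min a ∈ a :: xs := by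
  induction xs generalizing a with
  | nil => simp
  | cons x xs ih =>
    simp only [List.foldl_cons]
    rcases List.mem_cons.mp (ih (min a x)) with h | h
    · rw [h]; rcases min_choice a x with hm | hm <;> simp [hm]
    · simp [h]

theorem kkListMin_mem (l : List Int) (h : l ≠ []) : kkListMin l ∈ l := by
  match l with
  | x :: xs => exact foldl_min_mem xs x

theorem kkRemoveFirst_length (l : List Int) (v : Int) (h : v ∈ l) :
    (kkRemoveFirst l v).length + 1 = l.length := by
  induction l with
  | nil => simp at h
  | cons x xs ih =>
    by_cases hx : x = v
    · simp [kkRemoveFirst, hx]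
    · have hv : v ∈ xs := by
        rcases List.mem_cons.mp h with h1 | h1
        · exact absurd h1.symm hx
        · exact h1
      simp [kkRemoveFirst, hx, ih hv]

def kkLoopA (heap : List Int) : List Int :=
  if hcond : 1 < heap.length then
    let i := kkListMin heap
    let h1 := kkRemoveFirst heap i
    let j := kkListMin h1
    let h2 := kkRemoveFirst h1 j
    kkLoopA (h2 ++ [((i - j).natAbs : Int) * -1])
  else heap
termination_by heap.length
decreasing_by
  have h0 : heap ≠ [] := by intro h; rw [h] at hcond; simp at hcond
  have h1m := kkListMin_mem heap h0
  have e1 := kkRemoveFirst_length heap _ h1m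
  have h1ne : kkRemoveFirst heap (kkListMin heap) ≠ [] := by
    intro h; rw [h] at e1; simp at e1; omega
  have h2m := kkListMin_mem _ h1ne
  have e2 := kkRemoveFirst_length _ _ h2m
  simp only [List.length_append, List.length_cons, List.length_nil]
  omega

def karmarkar_karp (l : List Int) : Int :=
  let _n := l.length
  let _K := l.sum
  let heap := l.map (fun item => item * -1)
  let fin := kkLoopA heap
  -- final heappop: the minimum of the remaining (≤ 1 element) heap, i.e. its head; on an
  -- empty heap Python raises IndexError (excluded by Pre_), the 0 below is junk for that case
  let r := (match fin with | [] => 0 | x :: _ => x) * -1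
  (r.natAbs : Int)

-- ===== PORT B =====
-- the inner while loop of Source B: the number of leading elements ≥ d (the insertion position)
def kkFindPos : List Int → Int → Nat
  | [], _ => 0
  | x :: xs, d => if x ≥ d then kkFindPos xs d + 1 else 0

-- cited by kkLoopB's decreasing_by
theorem kkFindPos_insert_length (u : List Int) (d : Int) :
    (u.insertIdx (kkFindPos u d) d).length = u.length + 1 := by
  induction u with
  | nil => simp [kkFindPos]
  | cons x xs ih =>
    by_cases hx : x ≥ d
    · simpa [kkFindPos, hx] using ih
    · simp [kkFindPos, hx]

def kkLoopB (u : List Int) : List Int :=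
  match u with
  | a :: b :: rest =>
    let d := a - b
    kkLoopB (rest.insertIdx (kkFindPos rest d) d)
  | u => u
termination_by u.length
decreasing_by
  simp only [kkFindPos_insert_length, List.length_cons]
  omega

def karmarkar_karp_alt (l : List Int) : Int :=
  let u := PySem.List.sorted l (fun x => x) true
  -- u[0] on the empty list: Python raises IndexError (excluded by Pre_); 0 is junk there
  match kkLoopB u with
  | [] => 0
  | x :: _ => (x.natAbs : Int)

-- ===== PRECONDITION & SPEC =====
-- Pre_ excludes exactly the empty list, on which A raises IndexError (heappop from an empty
-- heap); B raises IndexError there too (u[0]).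
def Pre_karmarkar_karp (l : List Int) : Prop := l ≠ []
instance (l : List Int) : Decidable (Pre_karmarkar_karp l) := by unfold Pre_karmarkar_karp; infer_instance
def pvWitness_karmarkar_karp : List Int := [10, 8, 7, 5]

def Spec_karmarkar_karp (l : List Int) (out : Int) : Prop := out = karmarkar_karp_alt l
instance (l : List Int) (out : Int) : Decidable (Spec_karmarkar_karp l out) := by unfold Spec_karmarkar_karp; infer_instance

-- ===== CLAIM (what is proved, stated in full; the proofs are below) =====
def Claim_equal_karmarkar_karp : Prop := ∀ (l : List Int), Dom_karmarkar_karp l → Pre_karmarkar_karp l → Spec_karmarkar_karp l (karmarkar_karp l)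

-- ===== LEMMAS AND PROOFS =====

theorem foldl_min_le_init (xs : List Int) (a : Int) : xs.foldl min a ≤ a := by
  induction xs generalizing a with
  | nil => simp
  | cons x xs ih => exact le_trans (ih (min a x)) (min_le_left a x)

theorem foldl_min_le_mem (xs : List Int) : ∀ (a z : Int), z ∈ xs → xs.foldl min a ≤ z := by
  induction xs with
  | nil => intro a z hz; simp at hz
  | cons x xs ih =>
    intro a z hz
    simp only [List.foldl_cons]
    rcases List.mem_cons.mp hz with h1 | h1
    · subst h1
      exact le_trans (foldl_min_le_init xs (min a z)) (min_le_right a z)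
    · exact ih (min a x) z h1

theorem kkListMin_le (l : List Int) (z : Int) (hz : z ∈ l) : kkListMin l ≤ z := by
  match l with
  | x :: xs =>
    simp only [kkListMin]
    rcases List.mem_cons.mp hz with h1 | h1
    · subst h1; exact foldl_min_le_init xs z
    · exact foldl_min_le_mem xs x z h1

theorem kkRemoveFirst_perm (l : List Int) (v : Int) (h : v ∈ l) :
    (v :: kkRemoveFirst l v).Perm l := by
  induction l with
  | nil => simp at h
  | cons x xs ih =>
    by_cases hx : x = v
    · subst hx; simp [kkRemoveFirst]
    · have hv : v ∈ xs := by
        rcases List.mem_cons.mp h with h1 | h1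
        · exact absurd h1.symm hx
        · exact h1
      simp only [kkRemoveFirst, if_neg hx]
      exact (List.Perm.swap x v _).trans ((ih hv).cons x)

-- ordered insert: proof-side characterisation of Source B's position scan + insert
def insD : List Int → Int → List Int
  | [], d => [d]
  | x :: xs, d => if x ≥ d then x :: insD xs d else d :: x :: xs

theorem findPos_insert_eq_insD (u : List Int) (d : Int) :
    u.insertIdx (kkFindPos u d) d = insD u d := by
  induction u with
  | nil => rfl
  | cons x xs ih =>
    by_cases hx : x ≥ d
    · simp only [kkFindPos, insD, if_pos hx, List.insertIdx]
      simpa using ih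
    · simp [kkFindPos, insD, hx]

theorem insD_perm (u : List Int) (d : Int) : (insD u d).Perm (d :: u) := by
  induction u with
  | nil => simp [insD]
  | cons x xs ih =>
    by_cases hx : x ≥ d
    · simp only [insD, if_pos hx]
      exact (ih.cons x).trans (List.Perm.swap d x xs)
    · simp [insD, hx]

theorem insD_pairwise (u : List Int) (d : Int)
    (h : u.Pairwise (fun a b => b ≤ a)) : (insD u d).Pairwise (fun a b => b ≤ a) := by
  induction u with
  | nil => simp [insD]
  | cons x xs ih =>
    rcases List.pairwise_cons.mp h with ⟨hx, hxs⟩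
    by_cases hd : x ≥ d
    · simp only [insD, if_pos hd]
      refine List.pairwise_cons.mpr ⟨?_, ih hxs⟩
      intro y hy
      have : y ∈ d :: xs := (insD_perm xs d).mem_iff.mp hy
      rcases List.mem_cons.mp this with h1 | h1
      · omega
      · exact hx y h1
    · simp only [insD, if_neg hd]
      refine List.pairwise_cons.mpr ⟨?_, h⟩
      intro y hy
      rcases List.mem_cons.mp hy with h1 | h1
      · omega
      · have := hx y h1; omega

theorem kk_main : ∀ (n : Nat) (heap u : List Int), u.length ≤ n → u ≠ [] →
    u.Pairwise (fun a b => b ≤ a) → heap.Perm (u.map (fun x => -x)) →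
    ∃ v, kkLoopA heap = [-v] ∧ kkLoopB u = [v] := by
  intro n
  induction n with
  | zero =>
    intro heap u hlen hne _ _
    cases u <;> simp_all
  | succ n ih =>
    intro heap u hlen hne hpw hperm
    match u with
    | [] => exact absurd rfl hne
    | [x] =>
      have hheap : heap = [-x] := List.perm_singleton.mp (by simpa using hperm)
      refine ⟨x, ?_, ?_⟩
      · rw [hheap, kkLoopA]; simp
      · rw [kkLoopB]; simp
    | a :: b :: rest =>
      have hmap : (a :: b :: rest).map (fun x => -x)
          = -a :: -b :: rest.map (fun x => -x) := rfl
      have hlenheap : heap.length = rest.length + 2 := by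
        have := hperm.length_eq; simpa using this
      have hlen2 : 1 < heap.length := by omega
      have hne' : heap ≠ [] := by intro h; rw [h] at hlenheap; simp at hlenheap
      rcases List.pairwise_cons.mp hpw with ⟨ha, hpw1⟩
      rcases List.pairwise_cons.mp hpw1 with ⟨hb, hpwr⟩
      have hab : b ≤ a := ha b (by simp)
      -- the first pop returns -a
      have hmema : (-a) ∈ heap := hperm.mem_iff.mpr (by simp)
      have hia : kkListMin heap = -a := by
        apply le_antisymm (kkListMin_le heap _ hmema)
        have hm := kkListMin_mem heap hne'
        have : kkListMin heap ∈ (a :: b :: rest).map (fun x => -x) := hperm.mem_iff.mp hm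
        obtain ⟨y, hy, he⟩ := List.mem_map.mp this
        have : y ≤ a := by
          rcases List.mem_cons.mp hy with h1 | h1
          · omega
          · exact ha y h1
        omega
      have h1perm : (kkRemoveFirst heap (-a)).Perm (-b :: rest.map (fun x => -x)) := by
        have h2 : ((-a) :: kkRemoveFirst heap (-a)).Perm
            ((-a) :: (-b) :: rest.map (fun x => -x)) :=
          (kkRemoveFirst_perm heap (-a) hmema).trans (by rw [← hmap]; exact hperm)
        exact h2.cons_inv
      have h1ne : kkRemoveFirst heap (-a) ≠ [] := by
        intro h; have := h1perm.length_eq; rw [h] at this; simp at this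
      -- the second pop returns -b
      have hmemb : (-b) ∈ kkRemoveFirst heap (-a) := h1perm.mem_iff.mpr (by simp)
      have hjb : kkListMin (kkRemoveFirst heap (-a)) = -b := by
        apply le_antisymm (kkListMin_le _ _ hmemb)
        have hm := kkListMin_mem _ h1ne
        have : kkListMin (kkRemoveFirst heap (-a)) ∈ -b :: rest.map (fun x => -x) :=
          h1perm.mem_iff.mp hm
        rcases List.mem_cons.mp this with h1 | h1
        · omega
        · obtain ⟨y, hy, he⟩ := List.mem_map.mp h1
          have := hb y hy
          omega
      have h2perm : (kkRemoveFirst (kkRemoveFirst heap (-a)) (-b)).Perm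
          (rest.map (fun x => -x)) :=
        ((kkRemoveFirst_perm _ (-b) hmemb).trans h1perm).cons_inv
      -- the pushed value is -(a - b)
      have habs : (((-a) - (-b)).natAbs : Int) * -1 = -(a - b) := by
        have : (((-a) - (-b)).natAbs : Int) = a - b := by omega
        rw [this]; ring
      -- one unfolding of A's loop
      have stepA : kkLoopA heap = kkLoopA
          (kkRemoveFirst (kkRemoveFirst heap (-a)) (-b) ++ [-(a - b)]) := by
        conv_lhs => rw [kkLoopA]
        simp only [dif_pos hlen2, hia, hjb, habs]
      -- one unfolding of B's loop
      have stepB : kkLoopB (a :: b :: rest) = kkLoopB (insD rest (a - b)) := by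
        rw [kkLoopB]
        simp only [findPos_insert_eq_insD]
      -- the new states are again related
      have hperm' : (kkRemoveFirst (kkRemoveFirst heap (-a)) (-b) ++ [-(a - b)]).Perm
          ((insD rest (a - b)).map (fun x => -x)) := by
        have p1 : (kkRemoveFirst (kkRemoveFirst heap (-a)) (-b) ++ [-(a - b)]).Perm
            (-(a - b) :: rest.map (fun x => -x)) :=
          (List.perm_append_singleton _ _).trans (h2perm.cons _)
        have p2 : ((insD rest (a - b)).map (fun x => -x)).Perm
            (-(a - b) :: rest.map (fun x => -x)) := (insD_perm rest (a - b)).map _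
        exact p1.trans p2.symm
      have hne'' : insD rest (a - b) ≠ [] := by
        intro h; have := (insD_perm rest (a - b)).length_eq; rw [h] at this; simp at this
      have hlen' : (insD rest (a - b)).length ≤ n := by
        have := (insD_perm rest (a - b)).length_eq
        have hr : (a :: b :: rest).length ≤ n + 1 := hlen
        simp only [List.length_cons] at this hr
        omega
      obtain ⟨v, hA, hB⟩ := ih _ _ hlen' hne'' (insD_pairwise rest (a - b) hpwr) hperm'
      exact ⟨v, by rw [stepA, hA], by rw [stepB, hB]⟩

-- ===== VERDICT (by name: the statement is the Claim_ definition above) =====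
theorem karmarkar_karp_spec : Claim_equal_karmarkar_karp := by
  intro l _dom hpre
  unfold Spec_karmarkar_karp
  have hu := PySem.List.sorted_perm l (fun x => x) true
  have hune : PySem.List.sorted l (fun x => x) true ≠ [] := by
    intro h; rw [h] at hu; exact hpre (hu.symm.eq_nil)
  have hpw : (PySem.List.sorted l (fun x => x) true).Pairwise (fun a b => b ≤ a) :=
    PySem.List.sorted_pairwise_rev l (fun x => x)
  have hperm : (l.map (fun item => item * -1)).Perm
      ((PySem.List.sorted l (fun x => x) true).map (fun x => -x)) := by
    have : l.map (fun item => item * -1) = l.map (fun x => -x) := by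
      simp
    rw [this]
    exact hu.symm.map _
  obtain ⟨v, hA, hB⟩ := kk_main (PySem.List.sorted l (fun x => x) true).length
    (l.map (fun item => item * -1)) (PySem.List.sorted l (fun x => x) true)
    le_rfl hune hpw hperm
  show (((match kkLoopA (l.map (fun item => item * -1)) with
      | [] => (0 : Int) | x :: _ => x) * -1).natAbs : Int)
    = (match kkLoopB (PySem.List.sorted l (fun x => x) true) with
      | [] => (0 : Int) | x :: _ => ((x.natAbs : Int)))
  rw [hA, hB]
  simp
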